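-- pv_equiv track=rewrite | github.com/Excess-GitHub/Quechua-Segmentation-Models | src/preprocessing.py | apply_boundaries
-- ===== SOURCE A (Python) =====
-- from typing import List, Tuple, Set
--
-- def apply_boundaries(tokens: List[str], labels: List[int]) -> List[str]:
--     """
--     Apply boundary labels to split tokens into morpheme segments.
--
--     Args:
--         tokens: Grapheme tokens
--         labels: Binary boundary labels
--
--     Returns:
--         List of morpheme strings
--     """
--     segments = []
--     current = []
--
--     for i, tok in enumerate(tokens):
--         current.append(tok)
--         if i < len(labels) and labels[i] == 1:
--             segments.append("".join(current))
--             current = []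
--
--     if current:
--         segments.append("".join(current))
--
--     return segments
-- ===== SOURCE B (Python) =====
-- def apply_boundaries(tokens, labels):
--     n = len(tokens)
--     cuts = [i + 1 for i in range(n) if i < len(labels) and labels[i] == 1]
--     if n and (not cuts or cuts[-1] != n):
--         cuts.append(n)
--     segments = []
--     start = 0
--     for end in cuts:
--         segments.append("".join(tokens[start:end]))
--         start = end
--     return segments
-- ===== Notes on version B (the rewrite author's own statement) =====
-- stated objective: alternative
-- what changed: B first computes the list of cut positions from the labels and then emits each segment by joining a slice of tokens between consecutive cuts, instead of accumulating tokens one by one into a current buffer that is flushed at each boundary.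
import Mathlib
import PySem

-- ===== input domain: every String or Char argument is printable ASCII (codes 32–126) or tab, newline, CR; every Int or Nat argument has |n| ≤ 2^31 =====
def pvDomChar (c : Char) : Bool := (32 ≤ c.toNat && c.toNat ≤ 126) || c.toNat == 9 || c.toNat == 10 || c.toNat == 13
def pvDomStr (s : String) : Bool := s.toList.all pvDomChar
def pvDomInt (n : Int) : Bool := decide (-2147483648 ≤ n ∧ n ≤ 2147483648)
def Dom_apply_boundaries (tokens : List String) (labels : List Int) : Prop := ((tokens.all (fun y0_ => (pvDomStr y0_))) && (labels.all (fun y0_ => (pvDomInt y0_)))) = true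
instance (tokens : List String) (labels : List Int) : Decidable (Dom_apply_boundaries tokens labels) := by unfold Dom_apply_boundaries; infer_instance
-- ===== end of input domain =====

-- B computes the boundary cut positions up front and slices tokens between consecutive
-- cuts, instead of A's token-by-token accumulation into a current buffer (objective: alternative).


-- ===== PORT A =====
-- A's for-loop as structural recursion on the remaining tokens, carrying the loop
-- index i, the `current` buffer and the `segments` accumulator.
-- `labels[i]` is read as `labels.getD i 0`, exact because the guard `i < labels.length`
-- ensures the index is in range.
def aRec (labels : List Int) : Nat → List String → List String → List String → List String
  | _, cur, segs, [] => if cur ≠ [] then segs ++ [String.join cur] else segs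
  | i, cur, segs, tok :: rest =>
      let cur' := cur ++ [tok]
      if i < labels.length ∧ labels.getD i 0 = 1 then
        aRec labels (i + 1) [] (segs ++ [String.join cur']) rest
      else
        aRec labels (i + 1) cur' segs rest

def apply_boundaries (tokens : List String) (labels : List Int) : List String :=
  aRec labels 0 [] [] tokens

-- ===== PORT B =====
-- Source B: cuts = list comprehension over range(n); conditional append of n; then a fold
-- over cuts emitting ''.join(tokens[start:end]).  The slice tokens[start:end] with
-- 0 ≤ start ≤ end is exactly (tokens.drop start).take (end - start).
def apply_boundaries_alt (tokens : List String) (labels : List Int) : List String :=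
  let n := tokens.length
  let cuts := (List.range n).filterMap (fun i =>
    if i < labels.length ∧ labels.getD i 0 = 1 then some (i + 1) else none)
  let cuts2 := if n ≠ 0 ∧ cuts.getLast? ≠ some n then cuts ++ [n] else cuts
  (cuts2.foldl (fun (st : List String × Nat) e =>
      (st.1 ++ [String.join ((tokens.drop st.2).take (e - st.2))], e)) ([], 0)).1

-- ===== PRECONDITION & SPEC =====
def Spec_apply_boundaries (tokens : List String) (labels : List Int) (out : List String) : Prop := out = apply_boundaries_alt tokens labels
instance (tokens : List String) (labels : List Int) (out : List String) : Decidable (Spec_apply_boundaries tokens labels out) := by unfold Spec_apply_boundaries; infer_instance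

-- ===== CLAIM (what is proved, stated in full; the proofs are below) =====
def Claim_equal_apply_boundaries : Prop := ∀ (tokens : List String) (labels : List Int), Dom_apply_boundaries tokens labels → Spec_apply_boundaries tokens labels (apply_boundaries tokens labels)

-- ===== LEMMAS AND PROOFS =====

-- canonical recursive description of the segmentation, used to relate the two ports
def pstr (t : String) : List String → List String
  | [] => [t]
  | s :: r => (t ++ s) :: r

def fSeg : List String → List Int → List String
  | [], _ => []
  | t :: ts, [] => pstr t (fSeg ts [])
  | t :: ts, l :: ls => if l = 1 then t :: fSeg ts ls else pstr t (fSeg ts ls)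

-- prepend a pending buffer onto the head segment
def pj (cur : List String) : List String → List String
  | [] => if cur = [] then [] else [String.join cur]
  | s :: r => (String.join cur ++ s) :: r

def cutsOf (tokens : List String) (labels : List Int) : List Nat :=
  (List.range tokens.length).filterMap (fun i =>
    if i < labels.length ∧ labels.getD i 0 = 1 then some (i + 1) else none)

def gf (ts : List String) (ls : List Int) : List Nat :=
  if (cutsOf ts ls).getLast? ≠ some ts.length then cutsOf ts ls ++ [ts.length]
  else cutsOf ts ls

def segsFrom (tokens : List String) : Nat → List Nat → List String
  | _, [] => []
  | s, e :: cs => String.join ((tokens.drop s).take (e - s)) :: segsFrom tokens e cs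

theorem join_concat (a : List String) (t : String) :
    String.join (a ++ [t]) = String.join a ++ t := by
  simp [String.join, List.foldl_append]

theorem join_cons (t : String) (ts : List String) :
    String.join (t :: ts) = t ++ String.join ts := by
  induction ts using List.reverseRecOn with
  | nil => simp [String.join]
  | append_singleton xs x _ih =>
      rw [← List.cons_append, join_concat, join_concat, _ih, String.append_assoc]

theorem pj_pstr (cur : List String) (t : String) (L : List String) :
    pj cur (pstr t L) = pj (cur ++ [t]) L := by
  cases L with
  | nil => simp [pstr, pj, join_concat]
  | cons s r => simp [pstr, pj, join_concat, String.append_assoc]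

theorem pj_nil (L : List String) : pj [] L = L := by
  cases L <;> simp [pj, String.join]

theorem aRec_eq (labels : List Int) (toks : List String) :
    ∀ (i : Nat) (cur segs : List String),
      aRec labels i cur segs toks = segs ++ pj cur (fSeg toks (labels.drop i)) := by
  induction toks with
  | nil => intro i cur segs; by_cases h : cur = [] <;> simp [aRec, pj, fSeg, h]
  | cons t ts ih =>
      intro i cur segs
      by_cases hi : i < labels.length
      · have hdrop : labels.drop i = labels.getD i 0 :: labels.drop (i + 1) := by
          rw [List.getD_eq_getElem _ _ hi]; exact List.drop_eq_getElem_cons hi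
        by_cases hl : labels.getD i 0 = 1
        · rw [aRec, if_pos ⟨hi, hl⟩, ih, hdrop, fSeg, if_pos hl, pj_nil]
          simp [pj, join_concat, List.append_assoc]
        · rw [aRec, if_neg (by tauto), ih, hdrop, fSeg, if_neg hl, pj_pstr]
      · have h1 : labels.drop i = [] := List.drop_eq_nil_of_le (by omega)
        have h2 : labels.drop (i + 1) = [] := List.drop_eq_nil_of_le (by omega)
        rw [aRec, if_neg (by tauto), ih, h1, h2, fSeg, pj_pstr]

theorem fold_segs (tokens : List String) (cs : List Nat) :
    ∀ (acc : List String) (start : Nat),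
      (cs.foldl (fun (st : List String × Nat) e =>
        (st.1 ++ [String.join ((tokens.drop st.2).take (e - st.2))], e)) (acc, start)).1
      = acc ++ segsFrom tokens start cs := by
  induction cs with
  | nil => intro acc start; simp [segsFrom]
  | cons e cs ih => intro acc start; simp [List.foldl, ih, segsFrom]

theorem cutsOf_shift (t : String) (ts : List String) (l : Int) (ls : List Int) :
    cutsOf (t :: ts) (l :: ls)
      = (if l = 1 then [1] else []) ++ (cutsOf ts ls).map (· + 1) := by
  unfold cutsOf
  have hr : List.range (t :: ts).length = 0 :: (List.range ts.length).map Nat.succ := by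
    rw [List.length_cons, List.range_succ_eq_map]
  rw [hr, List.filterMap_cons, List.filterMap_map]
  have h1 : (if (0 : Nat) < (l :: ls).length ∧ (l :: ls).getD 0 0 = 1
      then some (1 : Nat) else none) = if l = 1 then some 1 else none := by
    simp [List.getD]
  have h2 : (List.range ts.length).filterMap
        ((fun i => if i < (l :: ls).length ∧ (l :: ls).getD i 0 = 1 then some (i + 1) else none)
          ∘ Nat.succ)
      = ((List.range ts.length).filterMap
          (fun i => if i < ls.length ∧ ls.getD i 0 = 1 then some (i + 1) else none)).map (· + 1) := by
    rw [List.map_filterMap]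
    apply List.filterMap_congr
    intro i _
    show (if i + 1 < (l :: ls).length ∧ (l :: ls).getD (i + 1) 0 = 1 then some (i + 1 + 1) else none)
        = (if i < ls.length ∧ ls.getD i 0 = 1 then some (i + 1) else none).map (· + 1)
    by_cases h : i < ls.length ∧ ls.getD i 0 = 1
    · rw [if_pos ⟨by simpa using h.1, by simpa using h.2⟩, if_pos h]; rfl
    · rw [if_neg (by intro hc; exact h ⟨by simpa using hc.1, by simpa using hc.2⟩), if_neg h]; rfl
  rw [h1, h2]
  cases Decidable.em (l = 1) with
  | inl h => simp [h]
  | inr h => simp [h]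

theorem cutsOf_nil (ls : List Int) : cutsOf [] ls = [] := rfl

theorem cutsOf_nil_labels (ts : List String) : cutsOf ts [] = [] := by
  unfold cutsOf
  simp

theorem gf_ne_nil (ts : List String) (ls : List Int) : gf ts ls ≠ [] := by
  unfold gf
  split
  · simp
  · rename_i h
    intro hc
    rw [hc] at h
    simp at h

theorem gf_shift (t : String) (ts : List String) (l : Int) (ls : List Int) (hts : ts ≠ []) :
    gf (t :: ts) (l :: ls) = (if l = 1 then [1] else []) ++ (gf ts ls).map (· + 1) := by
  have hC := cutsOf_shift t ts l ls
  have hne : ts.length ≠ 0 := by simpa using hts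
  rcases List.eq_nil_or_concat (cutsOf ts ls) with hc | ⟨c', a, hc⟩
  · have h1 : (cutsOf (t :: ts) (l :: ls)).getLast? ≠ some (t :: ts).length := by
      rw [hC, hc]
      cases Decidable.em (l = 1) with
      | inl h => simp [h]; omega
      | inr h => simp [h]
    have h2 : (cutsOf ts ls).getLast? ≠ some ts.length := by rw [hc]; simp
    rw [gf, gf, if_pos h1, if_pos h2, hC, hc]
    simp
  · have hlastTop : (cutsOf (t :: ts) (l :: ls)).getLast? = some (a + 1) := by
      rw [hC, hc, List.concat_eq_append, List.map_append, ← List.append_assoc]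
      simp
    have hlast : (cutsOf ts ls).getLast? = some a := by rw [hc]; simp
    by_cases hea : a = ts.length
    · have e1 : ¬ ((cutsOf (t :: ts) (l :: ls)).getLast? ≠ some (t :: ts).length) := by
        rw [hlastTop]; simp [hea]
      have e2 : ¬ ((cutsOf ts ls).getLast? ≠ some ts.length) := by rw [hlast]; simp [hea]
      rw [gf, gf, if_neg e1, if_neg e2, hC]
    · have e1 : (cutsOf (t :: ts) (l :: ls)).getLast? ≠ some (t :: ts).length := by
        rw [hlastTop]; simp only [ne_eq, Option.some.injEq, List.length_cons]; omega
      have e2 : (cutsOf ts ls).getLast? ≠ some ts.length := by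
        rw [hlast]; simp only [ne_eq, Option.some.injEq]; omega
      rw [gf, gf, if_pos e1, if_pos e2, hC]
      simp [List.append_assoc]

theorem segsFrom_shift (t : String) (ts : List String) (cs : List Nat) :
    ∀ s : Nat, segsFrom (t :: ts) (s + 1) (cs.map (· + 1)) = segsFrom ts s cs := by
  induction cs with
  | nil => intro s; simp [segsFrom]
  | cons e cs ih =>
      intro s
      simp only [List.map_cons, segsFrom, List.drop_succ_cons, Nat.add_sub_add_right, ih]

theorem fSeg_nil_labels (ts : List String) (h : ts ≠ []) :
    fSeg ts [] = [String.join ts] := by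
  induction ts with
  | nil => exact absurd rfl h
  | cons t ts ih =>
      cases ts with
      | nil => simp [fSeg, pstr, String.join]
      | cons u us =>
          rw [fSeg, ih (by simp), join_cons]
          simp [pstr, join_cons]

theorem main_lemma (ts : List String) :
    ∀ (ls : List Int), ts ≠ [] → segsFrom ts 0 (gf ts ls) = fSeg ts ls := by
  induction ts with
  | nil => intro ls h; exact absurd rfl h
  | cons t ts ih =>
      intro ls _
      cases ts with
      | nil =>
          -- single token: gf [t] ls = [1] whatever ls is
          have hgf : gf [t] ls = [1] := by
            unfold gf
            cases ls with
            | nil => simp [cutsOf_nil_labels]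
            | cons l ls' =>
                rw [cutsOf_shift]
                cases Decidable.em (l = 1) with
                | inl h => simp [h, cutsOf_nil]
                | inr h => simp [h, cutsOf_nil]
          rw [hgf]
          cases ls with
          | nil => simp [segsFrom, fSeg, pstr, String.join]
          | cons l ls' =>
              cases Decidable.em (l = 1) with
              | inl h => simp [segsFrom, fSeg, h, String.join]
              | inr h => simp [segsFrom, fSeg, pstr, h, String.join]
      | cons u us =>
          cases ls with
          | nil =>
              have hgf : gf (t :: u :: us) [] = [(t :: u :: us).length] := by
                unfold gf; simp [cutsOf_nil_labels]
              rw [hgf, fSeg_nil_labels _ (by simp)]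
              simp [segsFrom, List.take_of_length_le]
          | cons l ls' =>
              have hsh := gf_shift t (u :: us) l ls' (by simp)
              rw [hsh]
              cases Decidable.em (l = 1) with
              | inl h =>
                  rw [if_pos h]
                  show segsFrom (t :: u :: us) 0 (1 :: (gf (u :: us) ls').map (· + 1)) = _
                  rw [segsFrom]
                  have h01 : (1 : Nat) = 0 + 1 := rfl
                  rw [h01, segsFrom_shift, ih ls' (by simp)]
                  simp [fSeg, h, String.join]
              | inr h =>
                  rw [if_neg h]
                  obtain ⟨s, cs, hgfc⟩ := List.exists_cons_of_ne_nil (gf_ne_nil (u :: us) ls')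
                  rw [hgfc]
                  show segsFrom (t :: u :: us) 0 ((s + 1) :: cs.map (· + 1)) = _
                  rw [segsFrom, segsFrom_shift]
                  have hih : fSeg (u :: us) ls' = String.join (((u :: us).drop 0).take (s - 0)) :: segsFrom (u :: us) s cs := by
                    rw [← ih ls' (by simp), hgfc, segsFrom]
                  rw [fSeg, if_neg h, hih]
                  simp only [List.drop_zero, Nat.sub_zero, pstr,
                    List.take_succ_cons, join_cons]

theorem alt_eq_segs (tokens : List String) (labels : List Int) :
    apply_boundaries_alt tokens labels
      = segsFrom tokens 0
          (if tokens.length ≠ 0 ∧ (cutsOf tokens labels).getLast? ≠ some tokens.length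
           then cutsOf tokens labels ++ [tokens.length] else cutsOf tokens labels) := by
  show ((if tokens.length ≠ 0 ∧ (cutsOf tokens labels).getLast? ≠ some tokens.length
          then cutsOf tokens labels ++ [tokens.length] else cutsOf tokens labels).foldl
        (fun (st : List String × Nat) e =>
          (st.1 ++ [String.join ((tokens.drop st.2).take (e - st.2))], e)) ([], 0)).1 = _
  rw [fold_segs]
  rfl

-- ===== VERDICT (by name: the statement is the Claim_ definition above) =====
theorem apply_boundaries_spec : Claim_equal_apply_boundaries := by
  intro tokens labels _
  show apply_boundaries tokens labels = apply_boundaries_alt tokens labels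
  rw [alt_eq_segs]
  unfold apply_boundaries
  rw [aRec_eq, List.drop_zero, pj_nil]
  cases tokens with
  | nil => simp [fSeg, cutsOf_nil, segsFrom]
  | cons t ts =>
      rw [← main_lemma (t :: ts) labels (by simp)]
      unfold gf
      by_cases hc : (cutsOf (t :: ts) labels).getLast? ≠ some (t :: ts).length
      · have hp : (t :: ts).length ≠ 0 ∧
            (cutsOf (t :: ts) labels).getLast? ≠ some (t :: ts).length := ⟨by simp, hc⟩
        rw [if_pos hc, if_pos hp, List.nil_append]
      · have hn : ¬((t :: ts).length ≠ 0 ∧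
            (cutsOf (t :: ts) labels).getLast? ≠ some (t :: ts).length) := fun h => hc h.2
        rw [if_neg hc, if_neg hn, List.nil_append]
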